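-- pv_equiv track=rewrite | github.com/raspizone/eInk_dashboard7.5_PiPico | code.py | generate_calendar_matrix
-- ===== SOURCE A (Python) =====
-- def generate_calendar_matrix(year, month):
--     first_weekday = weekday(year, month, 1)  # 0 = Monday
--     days = days_in_month(year, month)
--     calendar_matrix = []
--     week = [0]*7
--     day = 1
--
--     # Fill first week
--     for i in range(first_weekday, 7):
--         week[i] = day
--         day += 1
--     calendar_matrix.append(week)
--
--     # Fill remaining weeks
--     while day <= days:
--         week = [0]*7
--         for i in range(7):
--             if day <= days:
--                 week[i] = day
--                 day += 1
--         calendar_matrix.append(week)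
--     return calendar_matrix
--
-- def is_leap(year):
--     return (year % 4 == 0 and year % 100 != 0) or (year % 400 == 0)
--
-- def days_in_month(year, month):
--     days_in_months = [31, 29 if is_leap(year) else 28, 31, 30, 31, 30,
--                       31, 31, 30, 31, 30, 31]
--     return days_in_months[month -1]
--
-- def weekday(year, month, day):
--     # Zeller's Congruence, returns 0=Monday ... 6=Sunday
--     if month < 3:
--         month += 12
--         year -= 1
--     K = year % 100
--     J = year // 100
--     h = (day + 13*(month + 1)//5 + K + K//4 + J//4 + 5*J) % 7
--     d = (h + 6) % 7  # Convert Zeller's to 0=Monday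
--     return d
-- ===== SOURCE B (Python) =====
-- def is_leap(year):
--     return (year % 4 == 0 and year % 100 != 0) or (year % 400 == 0)
--
-- def days_in_month(year, month):
--     days_in_months = [31, 29 if is_leap(year) else 28, 31, 30, 31, 30,
--                       31, 31, 30, 31, 30, 31]
--     return days_in_months[month - 1]
--
-- def weekday(year, month, day):
--     # Zeller's Congruence, 0=Monday ... 6=Sunday
--     if month < 3:
--         month += 12
--         year -= 1
--     K = year % 100
--     J = year // 100
--     h = (day + 13*(month + 1)//5 + K + K//4 + J//4 + 5*J) % 7
--     return (h + 6) % 7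
--
-- def generate_calendar_matrix(year, month):
--     first_weekday = weekday(year, month, 1)
--     days = days_in_month(year, month)
--     flat = [0] * first_weekday + list(range(1, days + 1))
--     flat += [0] * (-len(flat) % 7)
--     return [flat[i:i + 7] for i in range(0, len(flat), 7)]
-- ===== Notes on version B (the rewrite author's own statement) =====
-- stated objective: simpler
-- what changed: Replaces A's special first-week fill plus a while-loop that mutates week arrays with a single flat list build ([0]*first_weekday + days, padded to a multiple of 7) followed by one chunking pass.
import Mathlib
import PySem

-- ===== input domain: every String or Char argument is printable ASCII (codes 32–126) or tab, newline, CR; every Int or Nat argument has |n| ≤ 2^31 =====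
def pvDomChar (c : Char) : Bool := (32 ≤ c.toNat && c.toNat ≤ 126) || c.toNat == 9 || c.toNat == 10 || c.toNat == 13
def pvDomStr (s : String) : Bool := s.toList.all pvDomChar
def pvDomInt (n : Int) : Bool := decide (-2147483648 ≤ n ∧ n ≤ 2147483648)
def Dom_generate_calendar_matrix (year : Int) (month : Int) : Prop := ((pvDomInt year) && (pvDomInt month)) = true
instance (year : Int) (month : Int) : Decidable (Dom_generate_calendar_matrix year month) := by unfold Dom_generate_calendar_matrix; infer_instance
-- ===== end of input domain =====

-- B replaces A's first-week fill plus while-loop with one flat list build and a chunking pass (objective: simpler).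

-- ===== PORT A =====
-- shared helpers (identical in Source A and Source B): is_leap, days_in_month, weekday
def is_leap (year : Int) : Bool :=
  (PySem.Int.mod year 4 == 0 && !(PySem.Int.mod year 100 == 0)) || PySem.Int.mod year 400 == 0

-- Python raises IndexError when month-1 is out of [-12,11]; pyGetD's default 0 is never used inside Pre_
def days_in_month (year : Int) (month : Int) : Int :=
  let days_in_months : List Int :=
    [31, if is_leap year then 29 else 28, 31, 30, 31, 30, 31, 31, 30, 31, 30, 31]
  PySem.List.pyGetD days_in_months (month - 1) 0

def weekday (year : Int) (month : Int) (day : Int) : Int :=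
  let m := if month < 3 then month + 12 else month
  let y := if month < 3 then year - 1 else year
  let K := PySem.Int.mod y 100
  let J := PySem.Int.floordiv y 100
  let h := PySem.Int.mod (day + PySem.Int.floordiv (13 * (m + 1)) 5 + K + PySem.Int.floordiv K 4 + PySem.Int.floordiv J 4 + 5 * J) 7
  PySem.Int.mod (h + 6) 7

-- inner "for i in range(7): if day <= days: week[i] = day; day += 1"
def pvFillWeek (days : Int) (st : List Int × Int) : List Int × Int :=
  (List.range 7).foldl (fun st i => if st.2 ≤ days then (st.1.set i st.2, st.2 + 1) else st) st

-- "while day <= days: …" — fuel (days + 1 - day).toNat bounds the iteration count (day grows by ≥ 1 each pass); totality guard only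
def pvWeeksLoop (fuel : Nat) (days : Int) (day : Int) (acc : List (List Int)) : List (List Int) :=
  match fuel with
  | 0 => acc
  | fuel + 1 =>
    if day ≤ days then
      let st := pvFillWeek days (List.replicate 7 0, day)
      pvWeeksLoop fuel days st.2 (acc ++ [st.1])
    else acc

def generate_calendar_matrix (year : Int) (month : Int) : List (List Int) :=
  let first_weekday := weekday year month 1
  let days := days_in_month year month
  -- fill first week: for i in range(first_weekday, 7): week[i] = day; day += 1
  let st := (PySem.List.pyRange first_weekday 7 1).foldl
      (fun (st : List Int × Int) i => (st.1.set i.toNat st.2, st.2 + 1)) (List.replicate 7 0, 1)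
  pvWeeksLoop (days + 1 - st.2).toNat days st.2 [st.1]

-- ===== PORT B =====
def generate_calendar_matrix_alt (year : Int) (month : Int) : List (List Int) :=
  let first_weekday := weekday year month 1
  let days := days_in_month year month
  let flat := List.replicate first_weekday.toNat 0 ++ PySem.List.pyRange 1 (days + 1) 1
  let flat2 := flat ++ List.replicate (PySem.Int.mod (-(flat.length : Int)) 7).toNat 0
  (PySem.List.pyRange 0 (flat2.length : Int) 7).map (fun i => PySem.List.slice flat2 (some i) (some (i + 7)))

-- ===== PRECONDITION & SPEC =====
-- Pre_ excludes exactly the inputs where A raises IndexError in days_in_month (month-1 outside Python's index range [-12,11]); A returns on all admitted inputs.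
def Pre_generate_calendar_matrix (year : Int) (month : Int) : Prop := -11 ≤ month ∧ month ≤ 12
instance (year : Int) (month : Int) : Decidable (Pre_generate_calendar_matrix year month) := by unfold Pre_generate_calendar_matrix; infer_instance
def pvWitness_generate_calendar_matrix : Int × Int := (2024, 5)

def Spec_generate_calendar_matrix (year : Int) (month : Int) (out : List (List Int)) : Prop := out = generate_calendar_matrix_alt year month
instance (year : Int) (month : Int) (out : List (List Int)) : Decidable (Spec_generate_calendar_matrix year month out) := by unfold Spec_generate_calendar_matrix; infer_instance

-- ===== CLAIM (what is proved, stated in full; the proofs are below) =====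
def Claim_equal_generate_calendar_matrix : Prop := ∀ (year : Int) (month : Int), Dom_generate_calendar_matrix year month → Pre_generate_calendar_matrix year month → Spec_generate_calendar_matrix year month (generate_calendar_matrix year month)

-- ===== LEMMAS AND PROOFS =====

-- A's body as a function of (first_weekday, days) alone
def pvAbody (fw : Int) (days : Int) : List (List Int) :=
  let st := (PySem.List.pyRange fw 7 1).foldl
      (fun (st : List Int × Int) i => (st.1.set i.toNat st.2, st.2 + 1)) (List.replicate 7 0, 1)
  pvWeeksLoop (days + 1 - st.2).toNat days st.2 [st.1]

-- B's body as a function of (first_weekday, days) alone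
def pvBbody (fw : Int) (days : Int) : List (List Int) :=
  let flat := List.replicate fw.toNat 0 ++ PySem.List.pyRange 1 (days + 1) 1
  let flat2 := flat ++ List.replicate (PySem.Int.mod (-(flat.length : Int)) 7).toNat 0
  (PySem.List.pyRange 0 (flat2.length : Int) 7).map (fun i => PySem.List.slice flat2 (some i) (some (i + 7)))

lemma pvA_decomp (year month : Int) :
    generate_calendar_matrix year month = pvAbody (weekday year month 1) (days_in_month year month) := rfl

lemma pvB_decomp (year month : Int) :
    generate_calendar_matrix_alt year month = pvBbody (weekday year month 1) (days_in_month year month) := rfl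

lemma pvWeekday_bounds (year month day : Int) :
    0 ≤ weekday year month day ∧ weekday year month day < 7 :=
  ⟨PySem.Int.mod_nonneg _ (by norm_num), PySem.Int.mod_lt _ (by norm_num)⟩

lemma pvDays_cases (year month : Int) (h1 : -11 ≤ month) (h2 : month ≤ 12) :
    days_in_month year month = 28 ∨ days_in_month year month = 29 ∨
    days_in_month year month = 30 ∨ days_in_month year month = 31 := by
  unfold days_in_month
  cases is_leap year <;> simp only [Bool.false_eq_true, if_true, if_false] <;>
    interval_cases month <;> decide

lemma pvBody_eq (fw days : Int) (h0 : 0 ≤ fw) (h7 : fw < 7)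
    (hd : days = 28 ∨ days = 29 ∨ days = 30 ∨ days = 31) :
    pvAbody fw days = pvBbody fw days := by
  rcases hd with h | h | h | h <;> subst h <;> interval_cases fw <;> decide

-- ===== VERDICT (by name: the statement is the Claim_ definition above) =====
theorem generate_calendar_matrix_spec : Claim_equal_generate_calendar_matrix := by
  intro year month _ hpre
  unfold Spec_generate_calendar_matrix
  rw [pvA_decomp, pvB_decomp]
  exact pvBody_eq _ _ (pvWeekday_bounds year month 1).1 (pvWeekday_bounds year month 1).2
    (pvDays_cases year month hpre.1 hpre.2)
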